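-- pv_equiv track=rewrite | github.com/Dileepcs2018/Load_pycharm_project | Test_x/new_str.py | chop_comment
-- ===== SOURCE A (Python) =====
-- c_backslash = '\\'
--
-- c_dquote = '"'
--
-- c_comment = '#'
--
-- def chop_comment(line):
--     # a little state machine with two state varaibles:
--     in_quote = False  # whether we are in a quoted string right now
--     backslash_escape = False  # true if we just saw a backslash
--
--     for i, ch in enumerate(line):
--         if not in_quote and ch == c_comment:
--             # not in a quote, saw a '#', it's a comment.  Chop it and return!
--             return line[:i]
--         elif backslash_escape:
--             # we must have just seen a backslash; reset that flag and continue
--             backslash_escape = False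
--         elif in_quote and ch == c_backslash:
--             # we are in a quote and we see a backslash; escape next char
--             backslash_escape = True
--         elif ch == c_dquote:
--             in_quote = not in_quote
--
--     return line
-- ===== SOURCE B (Python) =====
-- def chop_comment(line):
--     # Mode-structured scanner: an outer scan for the cut point and a
--     # dedicated skipper for quoted strings (escapes consume two chars).
--     n = len(line)
--
--     def skip_string(i):
--         # line[i-1] was an opening '"'; return index just past the string.
--         while i < n:
--             ch = line[i]
--             if ch == '"':
--                 return i + 1
--             if ch == '\\':
--                 i += 2
--             else:
--                 i += 1
--         return n
--
--     i = 0
--     while i < n: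
--         ch = line[i]
--         if ch == '#':
--             return line[:i]
--         if ch == '"':
--             i = skip_string(i + 1)
--         else:
--             i += 1
--     return line
-- ===== Notes on version B (the rewrite author's own statement) =====
-- stated objective: alternative
-- what changed: Replaces A's single pass carrying two boolean state flags (in_quote, backslash_escape) with a mode-structured scanner: an outer loop that looks for the comment character or an opening quote, and a separate quoted-string skipper that consumes escaped pairs two characters at a time and returns the resume index.
import Mathlib
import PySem

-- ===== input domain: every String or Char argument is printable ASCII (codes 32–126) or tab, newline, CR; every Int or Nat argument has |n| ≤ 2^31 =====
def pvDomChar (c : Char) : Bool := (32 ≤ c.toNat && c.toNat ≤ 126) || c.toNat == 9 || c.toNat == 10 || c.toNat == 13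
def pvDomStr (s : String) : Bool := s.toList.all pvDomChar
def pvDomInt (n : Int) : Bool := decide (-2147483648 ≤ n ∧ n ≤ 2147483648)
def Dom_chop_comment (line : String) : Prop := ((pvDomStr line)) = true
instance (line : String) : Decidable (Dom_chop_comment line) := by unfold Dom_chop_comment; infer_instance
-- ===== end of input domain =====

-- B replaces A's boolean-flag state machine with a mode-structured scanner
-- (outer scan + dedicated quoted-string skipper); alternative, not faster.

-- ===== PORT A =====
-- A's for-loop with early return, as structural recursion over the characters,
-- carrying the index i and the two state flags; line[:i] with 0 ≤ i ≤ len is take i (exact).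
def chopGo : List Char → Nat → Bool → Bool → String → String
  | [], _, _, _, line => line
  | ch :: rest, i, in_quote, backslash_escape, line =>
    if in_quote = false ∧ ch = '#' then String.ofList (line.toList.take i)
    else if backslash_escape = true then chopGo rest (i+1) in_quote false line
    else if in_quote = true ∧ ch = '\\' then chopGo rest (i+1) in_quote true line
    else if ch = '"' then chopGo rest (i+1) (!in_quote) backslash_escape line
    else chopGo rest (i+1) in_quote backslash_escape line

def chop_comment (line : String) : String :=
  chopGo line.toList 0 false false line

-- ===== PORT B =====
-- skip_string over the remaining characters, returning how many it consumes
-- (relative rendering of B's absolute index arithmetic).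
def skipString : List Char → Nat
  | [] => 0
  | c :: rest =>
    if c = '"' then 1
    else if c = '\\' then
      match rest with
      | [] => 1
      | _ :: r => 2 + skipString r
    else 1 + skipString rest

-- B's outer while loop: length of the kept prefix (n itself when no unquoted '#').
def outerScan : List Char → Nat
  | [] => 0
  | c :: rest =>
    if c = '#' then 0
    else if c = '"' then
      let k := skipString rest
      1 + k + outerScan (rest.drop k)
    else 1 + outerScan rest
termination_by l => l.length
decreasing_by
  all_goals simp

def chop_comment_alt (line : String) : String :=
  String.ofList (line.toList.take (outerScan line.toList))

-- ===== PRECONDITION & SPEC =====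
def Spec_chop_comment (line : String) (out : String) : Prop := out = chop_comment_alt line
instance (line : String) (out : String) : Decidable (Spec_chop_comment line out) := by unfold Spec_chop_comment; infer_instance

-- ===== CLAIM (what is proved, stated in full; the proofs are below) =====
def Claim_equal_chop_comment : Prop := ∀ (line : String), Dom_chop_comment line → Spec_chop_comment line (chop_comment line)

-- ===== LEMMAS AND PROOFS =====

-- For a reachable state (q,b) of A's loop (b → q), the number of further
-- characters A keeps from the suffix l, phrased via B's scanners.
def restIdx : Bool → Bool → List Char → Nat
  | false, _, l => outerScan l
  | true, false, l => skipString l + outerScan (l.drop (skipString l))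
  | true, true, l =>
    match l with
    | [] => 0
    | _ :: r => 1 + skipString r + outerScan (r.drop (skipString r))

lemma restIdx_nil (q b : Bool) : restIdx q b [] = 0 := by
  cases q <;> cases b <;> simp [restIdx, outerScan, skipString]

lemma skipString_quote (rest : List Char) : skipString ('"' :: rest) = 1 := by
  rw [skipString.eq_def]; simp

lemma skipString_backslash (d : Char) (r : List Char) :
    skipString ('\\' :: d :: r) = 2 + skipString r := by
  rw [skipString.eq_def]; simp

lemma skipString_other (c : Char) (rest : List Char) (h1 : c ≠ '"') (h2 : c ≠ '\\') :
    skipString (c :: rest) = 1 + skipString rest := by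
  rw [skipString.eq_def]; simp [h1, h2]

lemma chopGo_eq (l : List Char) : ∀ (i : Nat) (q b : Bool) (s : String),
    (b = true → q = true) → i + l.length = s.toList.length →
    chopGo l i q b s = String.ofList (s.toList.take (i + restIdx q b l)) := by
  induction l with
  | nil =>
    intro i q b s _ hlen
    rw [restIdx_nil]
    have ht : s.toList.take (i + 0) = s.toList := by
      apply List.take_of_length_le
      rw [List.length_nil] at hlen; omega
    rw [ht]
    simp [chopGo]
  | cons c rest ih =>
    intro i q b s hqb hlen
    have hlen' : (i + 1) + rest.length = s.toList.length := by
      rw [List.length_cons] at hlen; omega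
    cases q with
    | false =>
      have hb : b = false := by
        cases b; rfl; exact absurd (hqb rfl) (by decide)
      subst hb
      by_cases hc : c = '#'
      · simp [chopGo, hc, restIdx, outerScan]
      · by_cases hq : c = '"'
        · rw [show chopGo (c :: rest) i false false s
                = chopGo rest (i+1) true false s by simp [chopGo, hq]]
          rw [ih (i+1) true false s (fun _ => rfl) hlen']
          have hcount : (i+1) + restIdx true false rest
              = i + restIdx false false (c :: rest) := by
            simp [restIdx, outerScan, hq]; omega
          rw [hcount]
        · rw [show chopGo (c :: rest) i false false s
                = chopGo rest (i+1) false false s by simp [chopGo, hc, hq]]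
          rw [ih (i+1) false false s (by simp) hlen']
          have hcount : (i+1) + restIdx false false rest
              = i + restIdx false false (c :: rest) := by
            simp [restIdx, outerScan, hc, hq]; omega
          rw [hcount]
    | true =>
      cases b with
      | true =>
        rw [show chopGo (c :: rest) i true true s
              = chopGo rest (i+1) true false s by simp [chopGo]]
        rw [ih (i+1) true false s (fun _ => rfl) hlen']
        have hcount : (i+1) + restIdx true false rest
            = i + restIdx true true (c :: rest) := by
          simp [restIdx]; omega
        rw [hcount]
      | false =>
        by_cases hbs : c = '\\'
        · rw [show chopGo (c :: rest) i true false s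
                = chopGo rest (i+1) true true s by simp [chopGo, hbs]]
          rw [ih (i+1) true true s (fun _ => rfl) hlen']
          have hcount : (i+1) + restIdx true true rest
              = i + restIdx true false (c :: rest) := by
            cases rest with
            | nil => rw [restIdx_nil]; simp [restIdx, hbs, skipString.eq_def, outerScan]
            | cons d r =>
              subst hbs
              have hd : List.drop (2 + skipString r) ('\\' :: d :: r)
                  = List.drop (skipString r) r := by
                rw [show 2 + skipString r = skipString r + 1 + 1 from by omega,
                    List.drop_succ_cons, List.drop_succ_cons]
              simp [restIdx, skipString_backslash, hd]
              omega
          rw [hcount]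
        · by_cases hq : c = '"'
          · rw [show chopGo (c :: rest) i true false s
                  = chopGo rest (i+1) false false s by simp [chopGo, hq]]
            rw [ih (i+1) false false s (by simp) hlen']
            have hcount : (i+1) + restIdx false false rest
                = i + restIdx true false (c :: rest) := by
              subst hq
              simp [restIdx, skipString_quote]
              omega
            rw [hcount]
          · rw [show chopGo (c :: rest) i true false s
                  = chopGo rest (i+1) true false s by simp [chopGo, hbs, hq]]
            rw [ih (i+1) true false s (fun _ => rfl) hlen']
            have hcount : (i+1) + restIdx true false rest
                = i + restIdx true false (c :: rest) := by
              have hd : List.drop (1 + skipString rest) (c :: rest)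
                  = List.drop (skipString rest) rest := by
                rw [show 1 + skipString rest = skipString rest + 1 from by omega,
                    List.drop_succ_cons]
              simp [restIdx, skipString_other c rest hq hbs, hd]
              omega
            rw [hcount]

-- ===== VERDICT (by name: the statement is the Claim_ definition above) =====
theorem chop_comment_spec : Claim_equal_chop_comment := by
  intro line _
  unfold Spec_chop_comment chop_comment chop_comment_alt
  rw [chopGo_eq line.toList 0 false false line (by simp) (by simp)]
  simp [restIdx]
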